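-- pv_equiv track=rewrite | github.com/Iruretagoyena/Algorithm_Design_And_Analysis_IIC2283 | T3/p2_try.py | get_least_sig_digit
-- ===== SOURCE A (Python) =====
-- def get_least_sig_digit(full_number):
--     full_number = str(full_number)
--     reversed_number = full_number[::-1]
--     pos = 0
--     digit = reversed_number[pos]
--     while digit == "0":
--         pos += 1
--         digit = reversed_number[pos]
--     return digit
-- ===== SOURCE B (Python) =====
-- def get_least_sig_digit(full_number):
--     # Pure integer arithmetic: strip trailing decimal zeros by repeated
--     # division, then read the last digit; only that one digit is stringified.
--     n = abs(full_number)
--     while n != 0 and n % 10 == 0: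
--         n //= 10
--     return str(n % 10)
-- ===== Notes on version B (the rewrite author's own statement) =====
-- stated objective: alternative
-- what changed: Replaces A's string conversion plus reversed-character scan by pure integer arithmetic: divide |n| by 10 while it ends in 0, then return str of the last digit, so no full decimal string is ever built or scanned.
-- outside the precondition, e.g. on get_least_sig_digit(0): A raises IndexError, B returns '0'
import Mathlib
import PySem

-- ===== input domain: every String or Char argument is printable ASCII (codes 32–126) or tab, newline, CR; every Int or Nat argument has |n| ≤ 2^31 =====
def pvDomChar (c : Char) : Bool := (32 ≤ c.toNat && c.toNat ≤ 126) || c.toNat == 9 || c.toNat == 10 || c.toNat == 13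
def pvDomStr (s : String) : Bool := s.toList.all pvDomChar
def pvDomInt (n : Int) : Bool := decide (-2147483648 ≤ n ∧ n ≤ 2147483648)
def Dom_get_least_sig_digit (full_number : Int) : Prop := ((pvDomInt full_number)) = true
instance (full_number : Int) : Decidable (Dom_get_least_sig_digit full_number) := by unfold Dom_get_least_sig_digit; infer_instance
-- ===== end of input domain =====

-- B replaces A's string conversion + reversed-character scan by pure integer
-- arithmetic (divide |n| by 10 while it ends in 0, stringify only the last digit).

-- ===== PORT A =====
-- A's while loop over reversed_number: pos advances past '0' characters; running
-- past the end is Python's IndexError (excluded by Pre_), here the "" fallback.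
def pvScanLoop : List Char → String
  | [] => ""
  | c :: rest => if c == '0' then pvScanLoop rest else String.ofList [c]

def get_least_sig_digit (full_number : Int) : String :=
  let full_number' := PySem.Int.toStr full_number
  let reversed_number := full_number'.toList.reverse   -- full_number[::-1]
  pvScanLoop reversed_number

-- ===== PORT B =====
-- the while loop 'while n != 0 and n % 10 == 0: n //= 10'; n = abs(full_number) ≥ 0,
-- so Nat's % and / are exact for Python's % and // here.
def pvStripLoop (m : Nat) : Nat :=
  if m ≠ 0 ∧ m % 10 = 0 then pvStripLoop (m / 10) else m
termination_by m
decreasing_by exact Nat.div_lt_self (Nat.pos_of_ne_zero (by omega)) (by omega)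

def get_least_sig_digit_alt (full_number : Int) : String :=
  let n := full_number.natAbs                  -- abs(full_number)
  PySem.Int.toStr ((pvStripLoop n % 10 : Nat) : Int)   -- str(n % 10)

-- ===== PRECONDITION & SPEC =====
-- A raises IndexError on full_number = 0 (str is "0", all zeros, the scan runs past the end).
def Pre_get_least_sig_digit (full_number : Int) : Prop := full_number ≠ 0
instance (full_number : Int) : Decidable (Pre_get_least_sig_digit full_number) := by
  unfold Pre_get_least_sig_digit; infer_instance
def pvWitness_get_least_sig_digit : Int := (120)

def Spec_get_least_sig_digit (full_number : Int) (out : String) : Prop := out = get_least_sig_digit_alt full_number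
instance (full_number : Int) (out : String) : Decidable (Spec_get_least_sig_digit full_number out) := by unfold Spec_get_least_sig_digit; infer_instance

-- ===== CLAIM (what is proved, stated in full; the proofs are below) =====
def Claim_equal_get_least_sig_digit : Prop := ∀ (full_number : Int), Dom_get_least_sig_digit full_number → Pre_get_least_sig_digit full_number → Spec_get_least_sig_digit full_number (get_least_sig_digit full_number)

-- ===== LEMMAS AND PROOFS =====

-- one unfolding of core's decimal printer, small case
theorem pvToDigits_small {m : Nat} (h : m < 10) : Nat.toDigits 10 m = [Nat.digitChar m] := by
  unfold Nat.toDigits Nat.toDigitsCore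
  have h1 : m / 10 = 0 := Nat.div_eq_of_lt h
  simp [h1, Nat.mod_eq_of_lt h]

theorem pvCore_acc (fuel n : Nat) (ds : List Char) :
    Nat.toDigitsCore 10 (fuel + 1) n ds = Nat.toDigitsCore 10 (fuel + 1) n [] ++ ds := by
  induction fuel generalizing n ds with
  | zero =>
    unfold Nat.toDigitsCore
    by_cases h : n / 10 = 0 <;> simp [h, Nat.toDigitsCore]
  | succ f ih =>
    conv_lhs => unfold Nat.toDigitsCore
    conv_rhs => unfold Nat.toDigitsCore
    by_cases h : n / 10 = 0
    · simp [h]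
    · simp only [h, if_false]
      rw [ih (n / 10) (Nat.digitChar (n % 10) :: ds), ih (n / 10) [Nat.digitChar (n % 10)]]
      simp

theorem pvCore_fuel (f1 f2 n : Nat) (h1 : n < f1) (h2 : n < f2) :
    Nat.toDigitsCore 10 f1 n [] = Nat.toDigitsCore 10 f2 n [] := by
  induction n using Nat.strong_induction_on generalizing f1 f2 with
  | _ n ih =>
    obtain ⟨g1, rfl⟩ : ∃ g, f1 = g + 1 := ⟨f1 - 1, by omega⟩
    obtain ⟨g2, rfl⟩ : ∃ g, f2 = g + 1 := ⟨f2 - 1, by omega⟩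
    conv_lhs => unfold Nat.toDigitsCore
    conv_rhs => unfold Nat.toDigitsCore
    by_cases h : n / 10 = 0
    · simp [h]
    · simp only [h, if_false]
      have hlt : n / 10 < n := Nat.div_lt_self (by omega) (by omega)
      obtain ⟨k1, rfl⟩ : ∃ k, g1 = k + 1 := ⟨g1 - 1, by omega⟩
      obtain ⟨k2, rfl⟩ : ∃ k, g2 = k + 1 := ⟨g2 - 1, by omega⟩
      rw [pvCore_acc k1 (n / 10), pvCore_acc k2 (n / 10),
        ih (n / 10) hlt (k1 + 1) (k2 + 1) (by omega) (by omega)]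

theorem pvToDigits_step {m : Nat} (h : 10 ≤ m) :
    Nat.toDigits 10 m = Nat.toDigits 10 (m / 10) ++ [Nat.digitChar (m % 10)] := by
  unfold Nat.toDigits
  conv_lhs => unfold Nat.toDigitsCore
  have h0 : ¬ (m / 10 = 0) := by omega
  simp only [h0, if_false]
  obtain ⟨k, rfl⟩ : ∃ k, m = k + 1 := ⟨m - 1, by omega⟩
  rw [pvCore_acc k (( k + 1) / 10)]
  rw [pvCore_fuel (k + 1) ((k + 1) / 10 + 1) ((k + 1) / 10) (by omega) (by omega)]

theorem pvDigitChar_ne_zero {d : Nat} (hlt : d < 10) (hne : d ≠ 0) :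
    (Nat.digitChar d == '0') = false := by
  interval_cases d <;> simp_all <;> decide

theorem pvScanLoop_cons (c : Char) (rest : List Char) :
    pvScanLoop (c :: rest) = if c == '0' then pvScanLoop rest else String.ofList [c] := rfl

-- the stripped number still has a nonzero last digit
theorem pvStrip_mod_ne {m : Nat} (h : 0 < m) : pvStripLoop m % 10 ≠ 0 := by
  induction m using Nat.strong_induction_on with
  | _ m ih =>
    rw [pvStripLoop]
    by_cases hg : m ≠ 0 ∧ m % 10 = 0
    · rw [if_pos hg]
      exact ih (m / 10) (Nat.div_lt_self h (by omega))
        (by rcases hg with ⟨h1, h2⟩; omega)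
    · rw [if_neg hg]
      omega

-- A's scan over the reversed digit string (with any non-digit tail behind it)
-- lands on the character of B's stripped last digit
theorem pvScan_toDigits {m : Nat} (h : 0 < m) (tail : List Char) :
    pvScanLoop ((Nat.toDigits 10 m).reverse ++ tail)
      = String.ofList [Nat.digitChar (pvStripLoop m % 10)] := by
  induction m using Nat.strong_induction_on generalizing tail with
  | _ m ih =>
    by_cases hsmall : m < 10
    · have hm10 : m % 10 = m := Nat.mod_eq_of_lt hsmall
      have hc : (Nat.digitChar m == '0') = false := pvDigitChar_ne_zero hsmall (by omega)
      have hg : ¬ (m ≠ 0 ∧ m % 10 = 0) := by omega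
      rw [pvToDigits_small hsmall, pvStripLoop, if_neg hg, hm10]
      simp [pvScanLoop_cons, hc]
    · have h10 : 10 ≤ m := by omega
      have hlt : m / 10 < m := Nat.div_lt_self h (by omega)
      rw [pvToDigits_step h10]
      simp only [List.reverse_append, List.reverse_singleton, List.cons_append, pvScanLoop_cons]
      by_cases hz : m % 10 = 0
      · have hpos : 0 < m / 10 := by omega
        rw [hz]
        have hc : (Nat.digitChar 0 == '0') = true := by decide
        rw [if_pos hc, pvStripLoop, if_pos ⟨by omega, hz⟩]
        exact ih (m / 10) hlt hpos tail
      · have hc : (Nat.digitChar (m % 10) == '0') = false :=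
          pvDigitChar_ne_zero (Nat.mod_lt _ (by omega)) hz
        rw [if_neg (by simp [hc]), pvStripLoop, if_neg (by omega)]

-- ===== VERDICT (by name: the statement is the Claim_ definition above) =====
theorem get_least_sig_digit_spec : Claim_equal_get_least_sig_digit := by
  intro n _ hn
  unfold Spec_get_least_sig_digit get_least_sig_digit get_least_sig_digit_alt
  have hpos : 0 < n.natAbs := by
    unfold Pre_get_least_sig_digit at hn; omega
  have hstrip := pvStrip_mod_ne hpos
  have hlt : pvStripLoop n.natAbs % 10 < 10 := Nat.mod_lt _ (by omega)
  -- B's side: str of a single nonzero digit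
  have hB : PySem.Int.toStr ((pvStripLoop n.natAbs % 10 : Nat) : Int)
      = String.ofList [Nat.digitChar (pvStripLoop n.natAbs % 10)] := by
    unfold PySem.Int.toStr PySem.Int.toChars
    have : ¬ ((pvStripLoop n.natAbs % 10 : Nat) : Int) < 0 := by omega
    simp only [this, if_false, Int.toNat_natCast]
    rw [pvToDigits_small hlt]
  rw [hB]
  -- A's side: the scan over the reversed decimal string
  simp only [PySem.Int.toList_toStr]
  unfold PySem.Int.toChars
  by_cases hneg : n < 0
  · simp only [hneg, if_true, List.reverse_cons]
    exact pvScan_toDigits hpos ['-']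
  · simp only [hneg, if_false]
    have : n.toNat = n.natAbs := by omega
    rw [this, ← List.append_nil (Nat.toDigits 10 n.natAbs).reverse]
    exact pvScan_toDigits hpos []
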